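-- pv_equiv track=rewrite | github.com/lostlunatiq/FinanceAI | ai/pipelines/ocr_pipeline.py | _detect_multi_invoice
-- ===== SOURCE A (Python) =====
-- def _detect_multi_invoice(all_extracted: list[dict]) -> list[list[int]]:
--     """
--     Detect if multiple separate invoices exist in a multi-page PDF.
--     Returns list of page-index groups. E.g. [[0,1], [2]] = invoice1 on pages 0-1, invoice2 on page 2.
--     Returns single group [[0,...,n-1]] if only one invoice detected.
--     """
--     if len(all_extracted) <= 1:
--         return [list(range(len(all_extracted)))]
--
--     invoice_numbers = [ext.get("invoice_number") for ext in all_extracted]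
--     non_null = [n for n in invoice_numbers if n]
--     unique_numbers = set(non_null)
--
--     # Single or no invoice number across all pages → one invoice
--     if len(unique_numbers) <= 1:
--         return [list(range(len(all_extracted)))]
--
--     # Multiple distinct invoice numbers → split into groups
--     groups = []
--     current_group = [0]
--     current_inv = invoice_numbers[0]
--
--     for i in range(1, len(invoice_numbers)):
--         inv = invoice_numbers[i]
--         if inv and inv != current_inv:
--             groups.append(current_group)
--             current_group = [i]
--             current_inv = inv
--         else:
--             current_group.append(i)
--             if inv:
--                 current_inv = inv
--
--     groups.append(current_group)
--     return groups
-- ===== SOURCE B (Python) =====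
-- def _detect_multi_invoice(all_extracted: list[dict]) -> list[list[int]]:
--     n = len(all_extracted)
--     if n <= 1:
--         return [list(range(n))]
--
--     invoice_numbers = [ext.get("invoice_number") for ext in all_extracted]
--     if len({x for x in invoice_numbers if x}) <= 1:
--         return [list(range(n))]
--
--     # Forward-fill: each page carries the last truthy invoice number seen
--     # (the first page keeps its own value even if falsy).
--     filled = []
--     prev = invoice_numbers[0]
--     for inv in invoice_numbers:
--         prev = inv if inv else prev
--         filled.append(prev)
--
--     # Partition page indices into maximal consecutive runs of equal filled key.
--     groups = []
--     i = 0
--     while i < n: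
--         j = i + 1
--         while j < n and filled[j] == filled[i]:
--             j += 1
--         groups.append(list(range(i, j)))
--         i = j
--     return groups
-- ===== Notes on version B (the rewrite author's own statement) =====
-- stated objective: alternative
-- what changed: Instead of one stateful loop carrying (groups, current_group, current_inv) with truthiness-guarded updates, B first forward-fills a key per page (falsy pages inherit the previous key) and then partitions the indices into maximal consecutive runs of equal key with a two-pointer scan.
import Mathlib
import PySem

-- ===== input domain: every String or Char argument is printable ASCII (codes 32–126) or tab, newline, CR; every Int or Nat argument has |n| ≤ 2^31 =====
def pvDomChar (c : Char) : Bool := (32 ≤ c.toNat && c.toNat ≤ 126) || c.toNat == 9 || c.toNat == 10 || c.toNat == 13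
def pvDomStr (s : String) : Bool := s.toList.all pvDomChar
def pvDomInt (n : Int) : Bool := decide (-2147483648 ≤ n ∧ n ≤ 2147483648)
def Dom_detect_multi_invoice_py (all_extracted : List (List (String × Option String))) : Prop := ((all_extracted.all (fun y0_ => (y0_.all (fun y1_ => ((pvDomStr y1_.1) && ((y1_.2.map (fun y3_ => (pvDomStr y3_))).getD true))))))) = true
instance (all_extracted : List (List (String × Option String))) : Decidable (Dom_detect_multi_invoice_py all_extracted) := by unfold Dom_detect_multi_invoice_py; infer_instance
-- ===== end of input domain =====

-- B replaces A's single stateful loop (groups, current_group, current_inv) by forward-filling a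
-- per-page key and partitioning indices into maximal runs of equal key with a two-pointer scan
-- (objective: alternative decomposition; same O(n) cost).

-- Python truthiness of an Optional[str] value (None and "" are falsy).
def pvTruthy (x : Option String) : Bool :=
  match x with
  | some s => decide (s ≠ "")
  | none => false

-- ===== PORT A =====
def detect_multi_invoice_py (all_extracted : List (List (String × Option String))) : List (List Int) :=
  if (all_extracted.length : Int) ≤ 1 then
    [PySem.List.pyRange 0 (all_extracted.length : Int) 1]
  else
    let invoice_numbers := all_extracted.map (fun ext => (PySem.Dict.mk ext).getD "invoice_number" none)
    let non_null := invoice_numbers.filter pvTruthy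
    let unique_numbers := PySem.Set.ofList non_null
    if (unique_numbers.length : Int) ≤ 1 then
      [PySem.List.pyRange 0 (all_extracted.length : Int) 1]
    else
      -- for i in range(1, len): indices are provably in range, so pyGetD's default is never used
      let st := (PySem.List.pyRange 1 (invoice_numbers.length : Int) 1).foldl
        (fun (st : List (List Int) × List Int × Option String) i =>
          let inv := PySem.List.pyGetD invoice_numbers i none
          if pvTruthy inv ∧ inv ≠ st.2.2 then
            (st.1 ++ [st.2.1], [i], inv)
          else
            (st.1, st.2.1 ++ [i], if pvTruthy inv then inv else st.2.2))
        ([], [(0 : Int)], PySem.List.pyGetD invoice_numbers 0 none)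
      st.1 ++ [st.2.1]

-- ===== PORT B =====
-- inner while: advance j while filled[j] == filled[i]
def pvRunEnd (filled : List (Option String)) (i j : Nat) : Nat :=
  if j < filled.length ∧ filled[j]? = filled[i]? then pvRunEnd filled i (j + 1) else j
termination_by filled.length - j

theorem pvRunEnd_ge (filled : List (Option String)) (i j : Nat) : j ≤ pvRunEnd filled i j := by
  fun_induction pvRunEnd filled i j with
  | case1 j h ih => omega
  | case2 j h => omega

-- outer while: emit one run [i, j) and continue at j
def pvScan (filled : List (Option String)) (i : Nat) : List (List Int) :=
  if i < filled.length then
    let j := pvRunEnd filled i (i + 1)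
    PySem.List.pyRange (i : Int) (j : Int) 1 :: pvScan filled j
  else []
termination_by filled.length - i
decreasing_by have := pvRunEnd_ge filled i (i + 1); omega

def detect_multi_invoice_py_alt (all_extracted : List (List (String × Option String))) : List (List Int) :=
  let n := (all_extracted.length : Int)
  if n ≤ 1 then [PySem.List.pyRange 0 n 1]
  else
    let invoice_numbers := all_extracted.map (fun ext => (PySem.Dict.mk ext).getD "invoice_number" none)
    if ((PySem.Set.ofList (invoice_numbers.filter pvTruthy)).length : Int) ≤ 1 then
      [PySem.List.pyRange 0 n 1]
    else
      let filled := (invoice_numbers.foldl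
        (fun (acc : List (Option String) × Option String) inv =>
          let prev := if pvTruthy inv then inv else acc.2
          (acc.1 ++ [prev], prev))
        ([], PySem.List.pyGetD invoice_numbers 0 none)).1
      pvScan filled 0

-- ===== PRECONDITION & SPEC =====
def Spec_detect_multi_invoice_py (all_extracted : List (List (String × Option String))) (out : List (List Int)) : Prop := out = detect_multi_invoice_py_alt all_extracted
instance (all_extracted : List (List (String × Option String))) (out : List (List Int)) : Decidable (Spec_detect_multi_invoice_py all_extracted out) := by unfold Spec_detect_multi_invoice_py; infer_instance

-- ===== CLAIM (what is proved, stated in full; the proofs are below) =====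
def Claim_equal_detect_multi_invoice_py : Prop := ∀ (all_extracted : List (List (String × Option String))), Dom_detect_multi_invoice_py all_extracted → Spec_detect_multi_invoice_py all_extracted (detect_multi_invoice_py all_extracted)

-- ===== LEMMAS AND PROOFS =====

-- forward fill: each element replaced by itself if truthy, else by the previous key
def fillAux : Option String → List (Option String) → List (Option String)
  | _, [] => []
  | k, x :: r => (if pvTruthy x then x else k) :: fillAux (if pvTruthy x then x else k) r

-- A's loop body, abstracted over the (index, value) pair
def pvStepA (st : List (List Int) × List Int × Option String) (p : Int × Option String) :
    List (List Int) × List Int × Option String :=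
  if pvTruthy p.2 ∧ p.2 ≠ st.2.2 then (st.1 ++ [st.2.1], [p.1], p.2)
  else (st.1, st.2.1 ++ [p.1], if pvTruthy p.2 then p.2 else st.2.2)

-- A's grouping as a recursion over (index, raw value) pairs
def runsFrom : Option String → List Int → List (Int × Option String) → List (List Int)
  | _, cur, [] => [cur]
  | k, cur, (i, inv) :: rest =>
    if pvTruthy inv ∧ inv ≠ k then cur :: runsFrom inv [i] rest
    else runsFrom (if pvTruthy inv then inv else k) (cur ++ [i]) rest

-- run partition over (index, filled key) pairs
def runsK : Option String → List Int → List (Int × Option String) → List (List Int)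
  | _, cur, [] => [cur]
  | k, cur, (i, f) :: rest => if f = k then runsK k (cur ++ [i]) rest else cur :: runsK f [i] rest

theorem foldl_pyRange_enum {σ : Type} (g : σ → Int → Option String → σ) (d : Option String) :
    ∀ (t pre : List (Option String)) (init : σ),
    (PySem.List.pyRange (pre.length : Int) (((pre ++ t).length : Nat) : Int) 1).foldl
        (fun st i => g st i (PySem.List.pyGetD (pre ++ t) i d)) init
    = (PySem.List.enumerate t (pre.length : Int)).foldl (fun st p => g st p.1 p.2) init := by
  intro t
  induction t with
  | nil =>
    intro pre init
    rw [PySem.List.pyRange_one_eq_nil (by simp), PySem.List.enumerate_nil]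
    rfl
  | cons x r ih =>
    intro pre init
    have hlt : (pre.length : Int) < (((pre ++ x :: r).length : Nat) : Int) := by
      simp
    rw [PySem.List.pyRange_one_cons hlt, List.foldl_cons, PySem.List.enumerate_cons, List.foldl_cons]
    have hget : PySem.List.pyGetD (pre ++ x :: r) (pre.length : Int) d = x := by
      rw [PySem.List.pyGetD_natCast]
      simp [List.getD]
    rw [hget]
    have h2 := ih (pre ++ [x]) (g init (pre.length : Int) x)
    simp only [List.append_assoc, List.cons_append, List.nil_append, List.length_append,
      List.length_cons, List.length_nil, Nat.cast_add, Nat.cast_one] at h2 ⊢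
    convert h2 using 2

theorem foldA_runs : ∀ (pairs : List (Int × Option String)) (k : Option String)
    (cur : List Int) (groups : List (List Int)),
    (pairs.foldl pvStepA (groups, cur, k)).1 ++ [(pairs.foldl pvStepA (groups, cur, k)).2.1]
    = groups ++ runsFrom k cur pairs := by
  intro pairs
  induction pairs with
  | nil => intro k cur groups; simp [runsFrom]
  | cons p rest ih =>
    intro k cur groups
    obtain ⟨i, inv⟩ := p
    simp only [List.foldl_cons, runsFrom]
    by_cases h : pvTruthy inv = true ∧ inv ≠ k
    · rw [if_pos h]
      show ((rest.foldl pvStepA (pvStepA (groups, cur, k) (i, inv))).1 ++ _) = _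
      rw [pvStepA, if_pos h]
      rw [ih inv [i] (groups ++ [cur])]
      simp
    · rw [if_neg h]
      show ((rest.foldl pvStepA (pvStepA (groups, cur, k) (i, inv))).1 ++ _) = _
      rw [pvStepA, if_neg h]
      exact ih _ _ _

theorem runsFrom_eq_runsK : ∀ (xs : List (Option String)) (s : Int) (k : Option String) (cur : List Int),
    runsFrom k cur (PySem.List.enumerate xs s) = runsK k cur (PySem.List.enumerate (fillAux k xs) s) := by
  intro xs
  induction xs with
  | nil => intro s k cur; simp [runsFrom, runsK, fillAux, PySem.List.enumerate_nil]
  | cons x r ih =>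
    intro s k cur
    rw [fillAux]
    rw [PySem.List.enumerate_cons, PySem.List.enumerate_cons]
    rw [runsFrom, runsK]
    by_cases h : pvTruthy x = true ∧ x ≠ k
    · rw [if_pos h, if_pos h.1, if_neg h.2, ih]
    · rw [if_neg h]
      have hk : (if pvTruthy x = true then x else k) = k := by
        by_cases ht : pvTruthy x = true
        · rw [if_pos ht]
          by_contra hne
          exact h ⟨ht, hne⟩
        · rw [if_neg ht]
      rw [hk, if_pos rfl]
      exact ih _ _ _

theorem foldFill : ∀ (xs : List (Option String)) (k : Option String) (acc : List (Option String)),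
    (xs.foldl (fun (a : List (Option String) × Option String) inv =>
        (a.1 ++ [if pvTruthy inv then inv else a.2], if pvTruthy inv then inv else a.2)) (acc, k)).1
    = acc ++ fillAux k xs := by
  intro xs
  induction xs with
  | nil => intro k acc; simp [fillAux]
  | cons x r ih =>
    intro k acc
    rw [List.foldl_cons, fillAux, ih]
    simp

theorem pvRunEnd_le (filled : List (Option String)) (i j : Nat) (h : j ≤ filled.length) :
    pvRunEnd filled i j ≤ filled.length := by
  fun_induction pvRunEnd filled i j with
  | case1 j h' ih => exact ih (by omega)
  | case2 j h' => exact h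

theorem pvRunEnd_seg (filled : List (Option String)) (i j : Nat) :
    ∀ m, j ≤ m → m < pvRunEnd filled i j → filled[m]? = filled[i]? := by
  fun_induction pvRunEnd filled i j with
  | case1 j h ih =>
    intro m hm hm'
    rcases Nat.eq_or_lt_of_le hm with rfl | hlt
    · exact h.2
    · exact ih m hlt hm'
  | case2 j h => intro m hm hm'; omega

theorem pvRunEnd_stop (filled : List (Option String)) (i j : Nat)
    (h : pvRunEnd filled i j < filled.length) :
    filled[pvRunEnd filled i j]? ≠ filled[i]? := by
  fun_induction pvRunEnd filled i j with
  | case1 j h' ih => exact ih h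
  | case2 j h' =>
    intro he
    exact h' ⟨h, he⟩

theorem runsK_consume : ∀ (pairs rest : List (Int × Option String)) (k : Option String) (cur : List Int),
    (∀ p ∈ pairs, p.2 = k) →
    runsK k cur (pairs ++ rest) = runsK k (cur ++ pairs.map (·.1)) rest := by
  intro pairs
  induction pairs with
  | nil => intro rest k cur h; simp
  | cons p ps ih =>
    intro rest k cur h
    obtain ⟨i, f⟩ := p
    have hf : f = k := h (i, f) (by simp)
    rw [List.cons_append, runsK, if_pos hf, ih _ _ _ (fun q hq => h q (by simp [hq]))]
    simp

theorem scan_eq_runsK : ∀ (filled : List (Option String)) (i : Nat), i < filled.length →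
    pvScan filled i = runsK (filled.getD i none) [(i : Int)]
      (PySem.List.enumerate (filled.drop (i + 1)) ((i : Int) + 1)) := by
  intro filled i
  fun_induction pvScan filled i with
  | case2 i h => intro hlt; omega
  | case1 i h jv ih =>
    intro _
    have hge : i + 1 ≤ pvRunEnd filled i (i + 1) := pvRunEnd_ge filled i (i + 1)
    have hle : pvRunEnd filled i (i + 1) ≤ filled.length :=
      pvRunEnd_le filled i (i + 1) (by omega)
    set j := pvRunEnd filled i (i + 1) with hj
    have hsplit : filled.drop (i + 1)
        = (filled.drop (i + 1)).take (j - (i + 1)) ++ filled.drop j := by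
      conv_lhs => rw [← List.take_append_drop (j - (i + 1)) (filled.drop (i + 1))]
      rw [List.drop_drop]
      congr 2
      omega
    set seg := (filled.drop (i + 1)).take (j - (i + 1)) with hsegdef
    have hseglen : seg.length = j - (i + 1) := by
      rw [hsegdef]
      simp
      omega
    rw [hsplit, PySem.List.enumerate_append]
    have hstart : (i : Int) + 1 + (seg.length : Int) = (j : Int) := by
      rw [hseglen]; push_cast; omega
    rw [hstart]
    have hmem : ∀ p ∈ PySem.List.enumerate seg ((i : Int) + 1), p.2 = filled.getD i none := by
      intro p hp
      rw [PySem.List.mem_enumerate_iff] at hp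
      obtain ⟨k, hk, rfl⟩ := hp
      have hk2 : k < j - (i + 1) := by omega
      have hik : i + 1 + k < filled.length := by omega
      have hsegk : seg[k] = filled[i + 1 + k] := by
        simp only [hsegdef, List.getElem_take, List.getElem_drop]
      have hq := pvRunEnd_seg filled i (i + 1) (i + 1 + k) (by omega) (by omega)
      rw [List.getElem?_eq_getElem hik, List.getElem?_eq_getElem (by omega : i < filled.length)] at hq
      simp only [Option.some.injEq] at hq
      simp only [hsegk, hq]
      rw [List.getD_eq_getElem?_getD, List.getElem?_eq_getElem (by omega : i < filled.length)]
      rfl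
    rw [runsK_consume _ _ _ _ hmem]
    have hcur : ([(i : Int)] ++ (PySem.List.enumerate seg ((i : Int) + 1)).map (·.1))
        = PySem.List.pyRange (i : Int) (j : Int) 1 := by
      rw [PySem.List.map_fst_enumerate, hstart]
      conv_rhs => rw [PySem.List.pyRange_one_cons (show (i : Int) < (j : Int) by push_cast; omega)]
      rfl
    by_cases hjl : j < filled.length
    · have hdrop : filled.drop j = filled[j] :: filled.drop (j + 1) := (List.getElem_cons_drop hjl).symm
      rw [hdrop, PySem.List.enumerate_cons, runsK]
      have hne : filled[j] ≠ filled.getD i none := by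
        have := pvRunEnd_stop filled i (i + 1) (by rw [← hj]; exact hjl)
        rw [← hj] at this
        rw [List.getElem?_eq_getElem hjl, List.getElem?_eq_getElem (by omega : i < filled.length)] at this
        intro he
        apply this
        rw [List.getD_eq_getElem?_getD, List.getElem?_eq_getElem (by omega : i < filled.length)] at he
        simp only [Option.getD_some] at he
        rw [he]
      rw [if_neg hne, ih hjl]
      have hgd : filled.getD j none = filled[j] := by
        rw [List.getD_eq_getElem?_getD, List.getElem?_eq_getElem hjl]
        rfl
      rw [hgd, ← hcur]
    · have hj2 : j = filled.length := by omega
      have hdrop : filled.drop j = [] := by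
        rw [hj2, List.drop_length]
      rw [hdrop, PySem.List.enumerate_nil, runsK]
      rw [pvScan, if_neg (by omega)]
      rw [← hcur]

-- ===== VERDICT (by name: the statement is the Claim_ definition above) =====
theorem detect_multi_invoice_py_spec : Claim_equal_detect_multi_invoice_py := by
  intro xs _
  show detect_multi_invoice_py xs = detect_multi_invoice_py_alt xs
  unfold detect_multi_invoice_py detect_multi_invoice_py_alt
  simp only []
  by_cases h1 : (xs.length : Int) ≤ 1
  · rw [if_pos h1, if_pos h1]
  · rw [if_neg h1, if_neg h1]
    set invs := xs.map (fun ext => (PySem.Dict.mk ext).getD "invoice_number" none) with hinvs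
    by_cases h2 : ((PySem.Set.ofList (invs.filter pvTruthy)).length : Int) ≤ 1
    · rw [if_pos h2, if_pos h2]
    · rw [if_neg h2, if_neg h2]
      obtain ⟨m, ms, hm⟩ : ∃ m ms, invs = m :: ms := by
        cases hx : xs with
        | nil => exfalso; rw [hx] at h1; simp at h1
        | cons a t => exact ⟨_, _, by rw [hinvs, hx, List.map_cons]⟩
      have hget0 : PySem.List.pyGetD invs 0 none = m := by
        rw [hm, PySem.List.pyGetD_zero_cons]
      -- A side
      have hA : (PySem.List.pyRange 1 (invs.length : Int) 1).foldl
          (fun (st : List (List Int) × List Int × Option String) i =>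
            let inv := PySem.List.pyGetD invs i none
            if pvTruthy inv ∧ inv ≠ st.2.2 then (st.1 ++ [st.2.1], [i], inv)
            else (st.1, st.2.1 ++ [i], if pvTruthy inv then inv else st.2.2))
          ([], [(0 : Int)], PySem.List.pyGetD invs 0 none)
          = (PySem.List.enumerate ms 1).foldl pvStepA ([], [(0 : Int)], m) := by
        rw [hget0, hm]
        have h3 := foldl_pyRange_enum (fun st i x => pvStepA st (i, x)) none ms [m]
          ([], [(0 : Int)], m)
        simp only [List.length_cons, List.length_nil, List.cons_append,
          List.nil_append] at h3
        norm_num at h3 ⊢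
        exact h3
      rw [hA]
      have hB := foldA_runs (PySem.List.enumerate ms 1) m [(0 : Int)] []
      rw [List.nil_append] at hB
      rw [hB]
      rw [runsFrom_eq_runsK]
      -- B side
      have hfill : (invs.foldl
          (fun (acc : List (Option String) × Option String) inv =>
            let prev := if pvTruthy inv then inv else acc.2
            (acc.1 ++ [prev], prev))
          ([], PySem.List.pyGetD invs 0 none)).1 = m :: fillAux m ms := by
        rw [hget0, hm, foldFill, fillAux, List.nil_append, ite_self]
      rw [hfill]
      have hscan := scan_eq_runsK (m :: fillAux m ms) 0 (by simp)
      simp only [List.getD_cons_zero, Nat.cast_zero, List.drop_one, List.tail_cons,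
        Nat.zero_add, zero_add] at hscan
      rw [hscan]
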